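-- pv_equiv track=rewrite | github.com/PaulGehin/advent-of-code | 2020/20.py | match_tiles
-- ===== SOURCE A (Python) =====
-- import collections
-- import itertools
--
-- def top(grid): return grid[0]
--
-- def bottom(grid): return grid[-1]
--
-- def left(grid): return ''.join(row[0] for row in grid)
--
-- def right(grid): return ''.join(row[-1] for row in grid)
--
-- def match_tiles(data):
--     resu = collections.defaultdict(list)
--     borders = borders = {
--         'top': top,
--         'bottom': bottom,
--         'left': left,
--         'right': right
--     }
--
--     for (i, grid_i), (j, grid_j) in itertools.combinations(data.items(), 2):
--         for (side_i, f_i), (side_j, f_j) in itertools.product(borders.items(), borders.items()):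
--             border_i, border_j = f_i(grid_i), f_j(grid_j)
--             if border_i == border_j:
--                 resu[i].append((side_i, False, j))
--                 resu[j].append((side_j, False, i))
--                 break
--             if border_i[::-1] == border_j:
--                 resu[i].append((side_i, True, j))
--                 resu[j].append((side_j, True, i))
--                 break
--     return resu
-- ===== SOURCE B (Python) =====
-- def match_tiles(data):
--     # Hash join on canonical borders: each border is put in a dict bucket under
--     # min(border, reversed border); only tiles sharing a bucket are candidate
--     # pairs, replayed in combinations order, so the all-pairs scan disappears.
--     sides = ('top', 'bottom', 'left', 'right')
--     tiles = list(data.items())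
--     borders = [(g[0], g[-1],
--                 ''.join(r[0] for r in g),
--                 ''.join(r[-1] for r in g)) for _, g in tiles]
--     index = {}
--     for p, bs in enumerate(borders):
--         for b in bs:
--             index.setdefault(min(b, b[::-1]), []).append(p)
--     matched = set()
--     for ps in index.values():
--         for k, p in enumerate(ps):
--             for q in ps[k + 1:]:
--                 if p != q:
--                     matched.add((p, q) if p < q else (q, p))
--     resu = {}
--     for p, q in sorted(matched):
--         bi, bj = borders[p], borders[q]
--         si, fl, sj = next((sa, ba != bb, sb)
--                           for sa, ba in zip(sides, bi)
--                           for sb, bb in zip(sides, bj)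
--                           if ba == bb or ba[::-1] == bb)
--         i, j = tiles[p][0], tiles[q][0]
--         resu.setdefault(i, []).append((si, fl, j))
--         resu.setdefault(j, []).append((sj, fl, i))
--     return resu
-- ===== Notes on version B (the rewrite author's own statement) =====
-- stated objective: faster
-- what changed: B replaces A's all-pairs 4x4 border comparison with a hash join: every border is bucketed once in a dict under its canonical form min(border, reversed border), candidate pairs are read off the buckets into a set and replayed in sorted (= combinations) order, and only those pairs get the side lookup, so the O(n^2) pair scan disappears.
-- outside the precondition, e.g. on match_tiles({0: []}): A returns {}, B raises IndexError
import Mathlib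
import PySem

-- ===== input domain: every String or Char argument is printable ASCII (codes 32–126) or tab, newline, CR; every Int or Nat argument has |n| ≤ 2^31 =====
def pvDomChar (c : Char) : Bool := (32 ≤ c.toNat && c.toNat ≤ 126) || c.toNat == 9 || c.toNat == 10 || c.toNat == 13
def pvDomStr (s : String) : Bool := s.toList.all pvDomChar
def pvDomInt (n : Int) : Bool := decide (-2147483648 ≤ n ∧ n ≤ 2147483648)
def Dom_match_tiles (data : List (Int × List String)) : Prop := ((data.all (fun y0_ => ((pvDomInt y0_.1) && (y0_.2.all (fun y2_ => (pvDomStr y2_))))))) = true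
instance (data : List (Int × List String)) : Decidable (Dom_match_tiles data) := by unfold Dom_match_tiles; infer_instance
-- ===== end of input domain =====

-- B replaces A's all-pairs border comparison by a hash join on canonical borders (objective: faster).

-- ===== PORT A =====
-- top(grid) = grid[0]  (IndexError on [] excluded by Pre_)
def pvTop (g : List String) : String := (PySem.List.pyGet? g 0).getD ""
-- bottom(grid) = grid[-1]
def pvBottom (g : List String) : String := (PySem.List.pyGet? g (-1)).getD ""
-- left(grid) = ''.join(row[0] for row in grid)  (IndexError on an empty row excluded by Pre_)
def pvLeft (g : List String) : String :=
  PySem.Str.join "" (g.map (fun r => String.ofList [(PySem.Str.pyGet? r 0).getD ' ']))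
-- right(grid) = ''.join(row[-1] for row in grid)
def pvRight (g : List String) : String :=
  PySem.Str.join "" (g.map (fun r => String.ofList [(PySem.Str.pyGet? r (-1)).getD ' ']))

-- itertools.combinations(xs, 2), unpacked as pairs in CPython's order
def pvCombos {α : Type} : List α → List (α × α)
  | [] => []
  | x :: xs => xs.map (fun y => (x, y)) ++ pvCombos xs

-- borders = {'top': top, 'bottom': bottom, 'left': left, 'right': right} (dict items in insertion order)
def pvBordersA : List (String × (List String → String)) :=
  [("top", pvTop), ("bottom", pvBottom), ("left", pvLeft), ("right", pvRight)]

-- the inner 'for … in product(borders.items(), borders.items()): … break' loop: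
-- first (side_i, side_j) whose borders match, with the flag of the branch that fired
def pvMatchA (gi gj : List String) : Option (String × Bool × String) :=
  (pvBordersA.product pvBordersA).findSome? (fun p =>
    if p.1.2 gi == p.2.2 gj then some (p.1.1, false, p.2.1)
    else if (PySem.Str.slice? (p.1.2 gi) none none (-1)).getD "" == p.2.2 gj then
      some (p.1.1, true, p.2.1)
    else none)

-- resu[k].append(v) on a defaultdict(list): in-place append to the stored list (fresh key gets [v] at the end)
def pvAppend (d : PySem.Dict Int (List (String × Bool × Int))) (k : Int)
    (v : String × Bool × Int) : PySem.Dict Int (List (String × Bool × Int)) :=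
  d.modify k [] (· ++ [v])

-- the body of A's outer loop, one pair of tiles
def pvStep (resu : PySem.Dict Int (List (String × Bool × Int)))
    (pr : (Int × List String) × (Int × List String)) :
    PySem.Dict Int (List (String × Bool × Int)) :=
  match pvMatchA pr.1.2 pr.2.2 with
  | some (si, fl, sj) => pvAppend (pvAppend resu pr.1.1 (si, fl, pr.2.1)) pr.2.1 (sj, fl, pr.1.1)
  | none => resu

def match_tiles (data : List (Int × List String)) : List (Int × List (String × Bool × Int)) :=
  ((pvCombos data).foldl pvStep PySem.Dict.empty).items

-- ===== PORT B =====
-- b[::-1]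
def bRev (s : String) : String := (PySem.Str.slice? s none none (-1)).getD ""

-- sides = ('top', 'bottom', 'left', 'right')
def bSides : List String := ["top", "bottom", "left", "right"]

-- the 4-tuple of borders of one grid, ported as a 4-element list
def bBorders (g : List String) : List String :=
  [(PySem.List.pyGet? g 0).getD "",
   (PySem.List.pyGet? g (-1)).getD "",
   PySem.Str.join "" (g.map (fun r => String.ofList [(PySem.Str.pyGet? r 0).getD ' '])),
   PySem.Str.join "" (g.map (fun r => String.ofList [(PySem.Str.pyGet? r (-1)).getD ' ']))]

-- min(b, b[::-1])  (Python's min of two strings: second iff it is strictly smaller)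
def bCanon (b : String) : String := if bRev b < b then bRev b else b

-- index.setdefault(min(b, b[::-1]), []).append(p): in-place append on the stored list = Dict.modify
def bIndex (borders : List (List String)) : PySem.Dict String (List Int) :=
  (PySem.List.enumerate borders 0).foldl
    (fun d e => e.2.foldl (fun d b => d.modify (bCanon b) [] (· ++ [e.1])) d)
    PySem.Dict.empty

-- (p, q) if p < q else (q, p)
def bNorm (p q : Int) : Int × Int := if p < q then (p, q) else (q, p)

-- for ps in index.values(): for k, p in enumerate(ps): for q in ps[k+1:]: if p != q: matched.add(…)
def bMatched (idx : PySem.Dict String (List Int)) : PySem.Set (Int × Int) :=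
  idx.values.foldl
    (fun m ps =>
      (PySem.List.enumerate ps 0).foldl
        (fun m kp =>
          (PySem.List.slice ps (some (kp.1 + 1)) none).foldl
            (fun m q => if kp.2 == q then m else PySem.Set.add m (bNorm kp.2 q)) m)
        m)
    PySem.Set.empty

-- next((sa, ba != bb, sb) for sa, ba in zip(sides, bi) for sb, bb in zip(sides, bj)
--      if ba == bb or ba[::-1] == bb)
def bMatch (bi bj : List String) : Option (String × Bool × String) :=
  (((bSides.zip bi).product (bSides.zip bj)).find?
      (fun q => q.1.2 == q.2.2 || bRev q.1.2 == q.2.2)).map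
    (fun q => (q.1.1, q.1.2 != q.2.2, q.2.1))

-- resu.setdefault(k, []).append(v): in-place append on the stored list = Dict.modify
def bAppend (d : PySem.Dict Int (List (String × Bool × Int))) (k : Int)
    (v : String × Bool × Int) : PySem.Dict Int (List (String × Bool × Int)) :=
  d.modify k [] (· ++ [v])

-- the body of B's loop over sorted(matched)
def bEmit (tiles : List (Int × List String)) (borders : List (List String))
    (resu : PySem.Dict Int (List (String × Bool × Int))) (pq : Int × Int) :
    PySem.Dict Int (List (String × Bool × Int)) :=
  match bMatch (PySem.List.pyGetD borders pq.1 []) (PySem.List.pyGetD borders pq.2 []) with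
  | some (si, fl, sj) =>
      let i := (PySem.List.pyGetD tiles pq.1 ((0 : Int), ([] : List String))).1
      let j := (PySem.List.pyGetD tiles pq.2 ((0 : Int), ([] : List String))).1
      bAppend (bAppend resu i (si, fl, j)) j (sj, fl, i)
  | none => resu  -- unreachable: every pair in matched shares a border, so next() succeeds

def match_tiles_alt (data : List (Int × List String)) : List (Int × List (String × Bool × Int)) :=
  let tiles := data
  let borders := tiles.map (fun t => bBorders t.2)
  ((PySem.List.sorted2 (bMatched (bIndex borders)) (fun pr => pr.1) (fun pr => pr.2) false).foldl
      (bEmit tiles borders) PySem.Dict.empty).items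

-- ===== PRECONDITION & SPEC =====
-- Pre_ excludes grids that are empty or contain an empty row — A raises IndexError on them whenever
-- such a tile takes part in a comparison and only trivially returns {} when it does not (fewer than
-- two tiles), while B's eager border precomputation always raises there — and lists with duplicate
-- tile ids, which do not represent a value of A's dict parameter (the list-to-dict conversion
-- collapses them before A runs, so the ports' list traversal would not be A's input).
def Pre_match_tiles (data : List (Int × List String)) : Prop :=
  (data.map Prod.fst).Nodup ∧ ∀ p ∈ data, p.2 ≠ [] ∧ ∀ r ∈ p.2, r ≠ ""
instance (data : List (Int × List String)) : Decidable (Pre_match_tiles data) := by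
  unfold Pre_match_tiles; infer_instance

def pvWitness_match_tiles : (List (Int × List String)) :=
  [(1, ["ab", "cd"]), (2, ["ab", "ef"]), (3, ["xy", "zw"])]

def Spec_match_tiles (data : List (Int × List String)) (out : List (Int × List (String × Bool × Int))) : Prop := out = match_tiles_alt data
instance (data : List (Int × List String)) (out : List (Int × List (String × Bool × Int))) : Decidable (Spec_match_tiles data out) := by unfold Spec_match_tiles; infer_instance

-- ===== CLAIM (what is proved, stated in full; the proofs are below) =====
def Claim_equal_match_tiles : Prop := ∀ (data : List (Int × List String)), Dom_match_tiles data → Pre_match_tiles data → Spec_match_tiles data (match_tiles data)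

-- ===== LEMMAS AND PROOFS =====

-- strict lexicographic order on Int pairs, the Bool Python uses to compare the tuples
def bLexB (a b : Int × Int) : Bool :=
  decide (a.1 < b.1) || (!decide (b.1 < a.1) && decide (a.2 < b.2))

theorem bLexB_asymm {a b : Int × Int} (h : bLexB a b = true) : bLexB b a = false := by
  simp [bLexB] at *; omega

theorem bLexB_trans_le {x y z : Int × Int} (h1 : bLexB x y = true) (h2 : bLexB z y = false) :
    bLexB z x = false := by
  simp [bLexB] at *; omega

-- orderedInsert keeps the list sorted (w.r.t. the "not strictly after" relation)
theorem insertBy_lex_pairwise (x : Int × Int) (l : List (Int × Int))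
    (h : l.Pairwise (fun a b => bLexB b a = false)) :
    (PySem.List.insertBy bLexB x l).Pairwise (fun a b => bLexB b a = false) := by
  induction l with
  | nil => simp [PySem.List.insertBy]
  | cons y ys ih =>
    rw [List.pairwise_cons] at h
    simp only [PySem.List.insertBy]
    by_cases hxy : bLexB x y = true
    · simp only [hxy, if_pos]
      refine List.Pairwise.cons ?_ (List.Pairwise.cons h.1 h.2)
      intro z hz
      rcases List.mem_cons.1 hz with rfl | hz
      · exact bLexB_asymm hxy
      · exact bLexB_trans_le hxy (h.1 z hz)
    · rw [Bool.not_eq_true] at hxy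
      simp only [hxy, Bool.false_eq_true, if_neg, not_false_iff]
      refine List.Pairwise.cons ?_ (ih h.2)
      intro z hz
      rcases (PySem.List.mem_insertBy bLexB x z ys).1 hz with rfl | hz
      · exact hxy
      · exact h.1 z hz

theorem foldl_insertBy_lex_pairwise (xs : List (Int × Int)) (acc : List (Int × Int))
    (h : acc.Pairwise (fun a b => bLexB b a = false)) :
    (xs.foldl (fun acc x => PySem.List.insertBy bLexB x acc) acc).Pairwise
      (fun a b => bLexB b a = false) := by
  induction xs generalizing acc with
  | nil => exact h
  | cons x t ih => exact ih _ (insertBy_lex_pairwise x acc h)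

-- sorted(matched) for a set of Int pairs IS the strictly lex-increasing enumeration of its elements
theorem sorted2_eq_of_perm_of_pairwise (xs ys : List (Int × Int))
    (hp : ys.Perm xs) (hs : ys.Pairwise (fun a b => bLexB a b = true)) :
    PySem.List.sorted2 xs (fun pr => pr.1) (fun pr => pr.2) false = ys := by
  have hsorted : PySem.List.sorted2 xs (fun pr => pr.1) (fun pr => pr.2) false
      = xs.foldl (fun acc x => PySem.List.insertBy bLexB x acc) [] := rfl
  refine List.Perm.eq_of_pairwise (le := fun a b => bLexB b a = false) ?_ ?_ ?_ ?_
  · intro a b _ _ h1 h2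
    simp [bLexB] at h1 h2
    have : a.1 = b.1 ∧ a.2 = b.2 := by omega
    exact Prod.ext this.1 this.2
  · rw [hsorted]; exact foldl_insertBy_lex_pairwise xs [] (by simp)
  · exact hs.imp (fun h => bLexB_asymm h)
  · exact (PySem.List.sorted2_perm xs _ _ false).trans hp.symm

-- generic membership through a fold that only adds elements
theorem foldl_set_mem {β γ : Type} [BEq γ] (step : PySem.Set γ → β → PySem.Set γ)
    (P : β → γ → Prop)
    (h : ∀ m x y, y ∈ step m x ↔ y ∈ m ∨ P x y) (l : List β) (m : PySem.Set γ) (y : γ) :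
    y ∈ l.foldl step m ↔ y ∈ m ∨ ∃ x ∈ l, P x y := by
  induction l generalizing m with
  | nil => simp
  | cons x t ih =>
    rw [List.foldl_cons, ih, h]
    constructor
    · rintro ((hm | hp) | ⟨z, hz, hp⟩)
      · exact Or.inl hm
      · exact Or.inr ⟨x, by simp, hp⟩
      · exact Or.inr ⟨z, by simp [hz], hp⟩
    · rintro (hm | ⟨z, hz, hp⟩)
      · exact Or.inl (Or.inl hm)
      · rcases List.mem_cons.1 hz with rfl | hz
        · exact Or.inl (Or.inr hp)
        · exact Or.inr ⟨z, hz, hp⟩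

-- generic Nodup through a fold whose step preserves it
theorem foldl_set_nodup {β γ : Type} [BEq γ] (step : PySem.Set γ → β → PySem.Set γ)
    (h : ∀ m x, m.Nodup → (step m x).Nodup) (l : List β) (m : PySem.Set γ)
    (hm : m.Nodup) : (l.foldl step m).Nodup := by
  induction l generalizing m with
  | nil => exact hm
  | cons x t ih => exact ih _ (h m x hm)

theorem bRev_eq (s : String) : bRev s = String.ofList s.toList.reverse := by
  have : PySem.Str.slice? s none none (-1) = some (String.ofList s.toList.reverse) := by
    simp [PySem.Str.slice?, PySem.Chars.slice?_eq_listSlice?, PySem.List.slice?_none_none_neg_one]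
  simp [bRev, this]

theorem bRev_bRev (s : String) : bRev (bRev s) = s := by
  simp [bRev_eq]

-- canonical borders are equal exactly when the borders match (as A compares them)
theorem bCanon_eq_iff (b1 b2 : String) :
    bCanon b1 = bCanon b2 ↔ (b1 = b2 ∨ bRev b1 = b2) := by
  constructor
  · unfold bCanon
    split_ifs with h1 h2 h2
    · intro h; left
      have := congrArg bRev h
      rwa [bRev_bRev, bRev_bRev] at this
    · intro h; right; exact h
    · intro h; right; rw [h, bRev_bRev]
    · intro h; left; exact h
  · rintro (rfl | rfl)
    · rfl
    · unfold bCanon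
      rw [bRev_bRev]
      rcases lt_trichotomy (bRev b1) b1 with h | h | h
      · rw [if_pos h, if_neg (not_lt_of_gt h)]
      · rw [h]
      · rw [if_neg (not_lt_of_gt h), if_pos h]

-- (p, q) together in some bucket of the index ⇔ p and q each have a border with that canonical form
-- a nested per-tile/per-border loop is one loop over the flattened (key, value) pairs
theorem foldl_foldl_map_flatMap {A B C D : Type} (g : A → List B) (k : A → B → D)
    (step : C → D → C) :
    ∀ (l : List A) (d : C),
      l.foldl (fun d e => (g e).foldl (fun d b => step d (k e b)) d) d
        = (l.flatMap (fun e => (g e).map (k e))).foldl step d := by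
  intro l
  induction l with
  | nil => intro d; rfl
  | cons e t ih =>
    intro d
    rw [List.foldl_cons, List.flatMap_cons, List.foldl_append, ih, List.foldl_map]

theorem mem_getD_bIndex (borders : List (List String)) (c : String) (p : Int) :
    p ∈ (bIndex borders).getD c [] ↔
      ∃ (k : Nat) (h : k < borders.length), p = (k : Int) ∧ ∃ b ∈ borders[k], bCanon b = c := by
  have hflat : bIndex borders
      = ((PySem.List.enumerate borders 0).flatMap
          (fun e => e.2.map (fun b => (bCanon b, e.1)))).foldl
          (fun d pr => d.modify pr.1 [] (· ++ [pr.2])) PySem.Dict.empty := by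
    unfold bIndex
    exact foldl_foldl_map_flatMap (fun e => e.2) (fun e b => (bCanon b, e.1))
      (fun d pr => d.modify pr.1 [] (· ++ [pr.2])) (PySem.List.enumerate borders 0)
      PySem.Dict.empty
  rw [hflat, PySem.Dict.getD_foldl_modify_append]
  simp only [PySem.Dict.getD_empty, List.nil_append, List.mem_map, List.mem_filter,
    List.mem_flatMap, PySem.List.mem_enumerate_iff, beq_iff_eq]
  constructor
  · rintro ⟨⟨c', p'⟩, ⟨⟨e, ⟨k, hk, rfl⟩, hb⟩, hc⟩, rfl⟩
    obtain ⟨b, hb, heq⟩ := hb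
    refine ⟨k, hk, ?_, b, hb, ?_⟩
    · have := congrArg Prod.snd heq
      simp only at this ⊢
      omega
    · have := congrArg Prod.fst heq
      simp only at this hc
      exact this.trans hc
  · rintro ⟨k, hk, rfl, b, hb, rfl⟩
    exact ⟨(bCanon b, (k : Int)), ⟨⟨((k : Int), borders[k]), ⟨k, hk, by simp⟩,
      ⟨b, hb, rfl⟩⟩, rfl⟩, rfl⟩

-- bNorm is symmetric on distinct arguments
theorem bNorm_comm {p q : Int} (h : p ≠ q) : bNorm p q = bNorm q p := by
  unfold bNorm; split_ifs <;> first | rfl | omega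

-- membership in matched, bucket by bucket
theorem mem_bMatched (idx : PySem.Dict String (List Int)) (y : Int × Int)
    (hnd : idx.keys.Nodup) :
    y ∈ bMatched idx ↔ ∃ c, ∃ p ∈ idx.getD c [], ∃ q ∈ idx.getD c [],
      p ≠ q ∧ y = bNorm p q := by
  have inner3 : ∀ (p : Int) (qs : List Int) (m : PySem.Set (Int × Int)) (z : Int × Int),
      z ∈ qs.foldl (fun m q => if p == q then m else PySem.Set.add m (bNorm p q)) m ↔
        z ∈ m ∨ ∃ q ∈ qs, p ≠ q ∧ z = bNorm p q := by
    intro p qs m z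
    refine foldl_set_mem _ (fun q z => p ≠ q ∧ z = bNorm p q) ?_ qs m z
    intro m q w
    by_cases hpq : p = q
    · subst hpq; simp
    · have hne : (p == q) = false := by simpa using hpq
      simp [hne, PySem.Set.mem_add, hpq]
  have inner2 : ∀ (ps : List Int) (m : PySem.Set (Int × Int)) (z : Int × Int),
      z ∈ (PySem.List.enumerate ps 0).foldl
            (fun m kp => (PySem.List.slice ps (some (kp.1 + 1)) none).foldl
              (fun m q => if kp.2 == q then m else PySem.Set.add m (bNorm kp.2 q)) m) m ↔
        z ∈ m ∨ ∃ p ∈ ps, ∃ q ∈ ps, p ≠ q ∧ z = bNorm p q := by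
    intro ps m z
    rw [foldl_set_mem _
      (fun kp z => ∃ q ∈ PySem.List.slice ps (some (kp.1 + 1)) none, kp.2 ≠ q ∧ z = bNorm kp.2 q)
      (fun m kp z => inner3 kp.2 _ m z) _ m z]
    apply or_congr_right
    constructor
    · rintro ⟨kp, hkp, q, hq, hne, rfl⟩
      obtain ⟨k, hk, rfl⟩ := (PySem.List.mem_enumerate_iff ps 0 kp).1 hkp
      refine ⟨ps[k], List.getElem_mem hk, q, ?_, by simpa using hne, rfl⟩
      have htn : ((0 + (k : Int)) + 1).toNat = k + 1 := by omega
      have : PySem.List.slice ps (some ((0 + (k : Int)) + 1)) none = ps.drop (k + 1) := by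
        rw [PySem.List.slice_from ps (by omega), htn]
      rw [this] at hq
      exact List.mem_of_mem_drop hq
    · rintro ⟨p, hp, q, hq, hne, rfl⟩
      obtain ⟨a, ha, rfl⟩ := List.mem_iff_getElem.1 hp
      obtain ⟨b, hb, rfl⟩ := List.mem_iff_getElem.1 hq
      have hab : a ≠ b := by rintro rfl; exact hne rfl
      have key : ∀ (a b : Nat) (ha : a < ps.length) (hb : b < ps.length), a < b →
          ps[a] ≠ ps[b] → ∃ kp ∈ PySem.List.enumerate ps 0,
            ∃ q ∈ PySem.List.slice ps (some (kp.1 + 1)) none, kp.2 ≠ q ∧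
              bNorm ps[a] ps[b] = bNorm kp.2 q := by
        intro a b ha hb hlt hne
        refine ⟨((a : Int), ps[a]), (PySem.List.mem_enumerate_iff ps 0 _).2 ⟨a, ha, by simp⟩,
          ps[b], ?_, hne, rfl⟩
        have htn : ((a : Int) + 1).toNat = a + 1 := by omega
        have hsl : PySem.List.slice ps (some ((a : Int) + 1)) none = ps.drop (a + 1) := by
          rw [PySem.List.slice_from ps (by omega), htn]
        rw [hsl]
        have hb' : b - (a + 1) < (ps.drop (a + 1)).length := by
          rw [List.length_drop]; omega
        have : (ps.drop (a + 1))[b - (a + 1)] = ps[b] := by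
          rw [List.getElem_drop]
          exact getElem_congr_idx (by omega)
        exact this ▸ List.getElem_mem hb'
      rcases Nat.lt_or_ge a b with hlt | hge
      · exact key a b ha hb hlt hne
      · have hlt : b < a := by omega
        obtain ⟨kp, h1, q, h2, h3, h4⟩ := key b a hb ha hlt (fun h => hne h.symm)
        exact ⟨kp, h1, q, h2, h3, (bNorm_comm hne).trans h4⟩
  unfold bMatched
  rw [foldl_set_mem _ (fun ps y => ∃ p ∈ ps, ∃ q ∈ ps, p ≠ q ∧ y = bNorm p q)
    (fun m ps z => inner2 ps m z) _ _ y]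
  simp only [PySem.Set.empty, List.not_mem_nil, false_or]
  rw [PySem.Dict.values_eq_map_keys idx hnd []]
  constructor
  · rintro ⟨ps, hps, hP⟩
    obtain ⟨c, _, rfl⟩ := List.mem_map.1 hps
    exact ⟨c, hP⟩
  · rintro ⟨c, p, hp, rest⟩
    by_cases hc : idx.contains c = true
    · exact ⟨idx.getD c [], List.mem_map.2 ⟨c, (PySem.Dict.contains_iff_mem_keys idx c).1 hc, rfl⟩,
        p, hp, rest⟩
    · rw [Bool.not_eq_true] at hc
      rw [PySem.Dict.getD_of_not_contains idx [] hc] at hp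
      exact absurd hp (List.not_mem_nil)

-- the Bool test B's hash join answers: do these two border lists share a (possibly reversed) border?
theorem bMatch_isSome_iff (bi bj : List String) (hi : bi.length = 4) (hj : bj.length = 4) :
    (bMatch bi bj).isSome = true ↔ ∃ b1 ∈ bi, ∃ b2 ∈ bj, bCanon b1 = bCanon b2 := by
  unfold bMatch
  rw [Option.isSome_map, List.find?_isSome]
  constructor
  · rintro ⟨⟨⟨s1, b1⟩, ⟨s2, b2⟩⟩, hmem, hpred⟩
    rw [List.pair_mem_product] at hmem
    refine ⟨b1, (List.of_mem_zip hmem.1).2, b2, (List.of_mem_zip hmem.2).2, ?_⟩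
    rw [bCanon_eq_iff]
    simpa using hpred
  · rintro ⟨b1, hb1, b2, hb2, hc⟩
    rw [bCanon_eq_iff] at hc
    have h1 : b1 ∈ (bSides.zip bi).map Prod.snd := by
      rw [List.map_snd_zip (by simp [bSides, hi])]; exact hb1
    have h2 : b2 ∈ (bSides.zip bj).map Prod.snd := by
      rw [List.map_snd_zip (by simp [bSides, hj])]; exact hb2
    obtain ⟨u, hu, rfl⟩ := List.mem_map.1 h1
    obtain ⟨v, hv, rfl⟩ := List.mem_map.1 h2
    exact ⟨(u, v), List.pair_mem_product.2 ⟨hu, hv⟩, by simpa using hc⟩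

-- members of pvCombos over a strictly increasing list
theorem mem_pvCombos_of_pairwise {l : List Int} (h : l.Pairwise (· < ·)) (a b : Int) :
    (a, b) ∈ pvCombos l ↔ a ∈ l ∧ b ∈ l ∧ a < b := by
  induction l with
  | nil => simp [pvCombos]
  | cons x xs ih =>
    rw [List.pairwise_cons] at h
    simp only [pvCombos, List.mem_append, List.mem_map, List.mem_cons, ih h.2]
    constructor
    · rintro (⟨y, hy, heq⟩ | ⟨ha, hb, hab⟩)
      · obtain ⟨rfl, rfl⟩ := Prod.mk.injEq .. ▸ heq
        exact ⟨Or.inl rfl, Or.inr hy, h.1 _ hy⟩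
      · exact ⟨Or.inr ha, Or.inr hb, hab⟩
    · rintro ⟨ha | ha, hb | hb, hab⟩
      · omega
      · subst ha; exact Or.inl ⟨b, hb, rfl⟩
      · subst hb; exact absurd (h.1 a ha) (by omega)
      · exact Or.inr ⟨ha, hb, hab⟩

theorem fst_mem_of_mem_pvCombos {l : List Int} {pq : Int × Int} (h : pq ∈ pvCombos l) :
    pq.1 ∈ l ∧ pq.2 ∈ l := by
  induction l with
  | nil => simp [pvCombos] at h
  | cons x xs ih =>
    simp only [pvCombos, List.mem_append, List.mem_map] at h
    rcases h with ⟨y, hy, rfl⟩ | h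
    · exact ⟨by simp, by simp [hy]⟩
    · obtain ⟨h1, h2⟩ := ih h
      exact ⟨List.mem_cons_of_mem _ h1, List.mem_cons_of_mem _ h2⟩

theorem pairwise_pvCombos {l : List Int} (h : l.Pairwise (· < ·)) :
    (pvCombos l).Pairwise (fun u v => bLexB u v = true) := by
  induction l with
  | nil => exact List.Pairwise.nil
  | cons x xs ih =>
    rw [List.pairwise_cons] at h
    simp only [pvCombos]
    rw [List.pairwise_append]
    refine ⟨?_, ih h.2, ?_⟩
    · refine List.pairwise_map.2 ?_
      refine h.2.imp_of_mem ?_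
      intro a b _ _ hab
      simp [bLexB]; omega
    · intro u hu v hv
      obtain ⟨y, _, rfl⟩ := List.mem_map.1 hu
      have := (fst_mem_of_mem_pvCombos hv).1
      have hx : x < v.1 := h.1 _ this
      simp [bLexB]; omega

-- combinations of the data list are the combinations of the index range, looked up
theorem pvCombos_map {α β : Type} (f : α → β) (l : List α) :
    pvCombos (l.map f) = (pvCombos l).map (fun q => (f q.1, f q.2)) := by
  induction l with
  | nil => rfl
  | cons x t ih => simp [pvCombos, ih, List.map_map, Function.comp_def]

-- A's inner loop equals B's matcher over the precomputed borders (first match in product order)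
theorem findSome?_match_eq (rv : String → String)
    (l : List ((String × String) × (String × String))) :
    l.findSome? (fun p =>
        if p.1.2 == p.2.2 then some (p.1.1, false, p.2.1)
        else if rv p.1.2 == p.2.2 then some (p.1.1, true, p.2.1)
        else none)
      = (l.find? (fun q => q.1.2 == q.2.2 || rv q.1.2 == q.2.2)).map
          (fun q => (q.1.1, q.1.2 != q.2.2, q.2.1)) := by
  induction l with
  | nil => rfl
  | cons p t ih =>
    rw [List.findSome?_cons, List.find?_cons]
    cases h1 : (p.1.2 == p.2.2) with
    | true => simp [h1, bne]
    | false =>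
      cases h2 : (rv p.1.2 == p.2.2) with
      | true => simp [h1, bne]
      | false => simp only [Bool.false_or]; simpa using ih

theorem pvMatchA_eq_bMatch (gi gj : List String) :
    pvMatchA gi gj = bMatch (bBorders gi) (bBorders gj) := by
  have hmap :
      ((pvBordersA.product pvBordersA).map
          (fun p => ((p.1.1, p.1.2 gi), (p.2.1, p.2.2 gj))))
        = (bSides.zip (bBorders gi)).product (bSides.zip (bBorders gj)) := by
    rfl
  have h := findSome?_match_eq bRev
      ((pvBordersA.product pvBordersA).map
        (fun p => ((p.1.1, p.1.2 gi), (p.2.1, p.2.2 gj))))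
  rw [List.findSome?_map] at h
  unfold pvMatchA bMatch bRev
  rw [← hmap]
  exact h

-- the main reduction: both ports fold bEmit over the lex-sorted list of matching index pairs
theorem match_tiles_eq (data : List (Int × List String)) :
    match_tiles data = match_tiles_alt data := by
  set d0 : Int × List String := ((0 : Int), ([] : List String)) with hd0
  set borders := data.map (fun t => bBorders t.2) with hborders
  set R := PySem.List.pyRange 0 (data.length : Int) 1 with hR
  set predM : Int × Int → Bool := fun pq =>
    (bMatch (PySem.List.pyGetD borders pq.1 []) (PySem.List.pyGetD borders pq.2 [])).isSome
    with hpredM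
  have hRpw : R.Pairwise (· < ·) := PySem.List.pairwise_lt_pyRange_one 0 _
  have hmemR : ∀ x : Int, x ∈ R ↔ 0 ≤ x ∧ x < (data.length : Int) := by
    intro x; rw [hR, PySem.List.mem_pyRange_one]
  -- bounds for members of pvCombos R, and the getElem forms there
  have hbounds : ∀ pq : Int × Int, pq ∈ pvCombos R →
      0 ≤ pq.1 ∧ pq.1 < pq.2 ∧ pq.2 < (data.length : Int) := by
    intro pq hpq
    obtain ⟨h1, h2⟩ := fst_mem_of_mem_pvCombos hpq
    rw [hmemR] at h1 h2
    have := (mem_pvCombos_of_pairwise hRpw pq.1 pq.2).1 (by simpa using hpq)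
    exact ⟨h1.1, this.2.2, h2.2⟩
  have hget : ∀ (i : Int), 0 ≤ i → i < (data.length : Int) →
      PySem.List.pyGetD borders i [] = bBorders (PySem.List.pyGetD data i d0).2 := by
    intro i h0 h1
    rw [PySem.List.pyGetD_eq_getElem borders [] h0 (by simpa [hborders] using h1),
      PySem.List.pyGetD_eq_getElem data d0 h0 h1]
    simp [hborders]
  -- A reduces to the filtered fold over index pairs
  have hA : match_tiles data
      = (((pvCombos R).filter predM).foldl (bEmit data borders) PySem.Dict.empty).items := by
    unfold match_tiles
    have h1 : pvCombos data = (pvCombos R).map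
        (fun pq => (PySem.List.pyGetD data pq.1 d0, PySem.List.pyGetD data pq.2 d0)) := by
      conv_lhs => rw [← PySem.List.map_pyGetD_pyRange_zero' data d0]
      rw [pvCombos_map]
    rw [h1, List.foldl_map]
    rw [PySem.List.foldl_congr_mem _ _
      (fun acc pq => if predM pq then bEmit data borders acc pq else acc) _ ?_]
    · rw [PySem.List.foldl_if_eq_foldl_filter]
    · intro acc pq hpq
      obtain ⟨hb0, hb1, hb2⟩ := hbounds pq hpq
      have e1 := hget pq.1 hb0 (by omega)
      have e2 := hget pq.2 (by omega) hb2
      show pvStep acc _ = _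
      unfold pvStep bEmit
      rw [pvMatchA_eq_bMatch, ← e1, ← e2]
      cases hm : bMatch (PySem.List.pyGetD borders pq.1 [])
          (PySem.List.pyGetD borders pq.2 []) with
      | none => simp [hpredM, hm]
      | some r =>
        obtain ⟨s1, fl, s2⟩ := r
        simp only [hpredM, hm, Option.isSome_some, if_true]
        rfl
  -- B's sorted matched set is that same filtered list
  have hnd : (bIndex borders).keys.Nodup := by
    have hflat : bIndex borders
        = ((PySem.List.enumerate borders 0).flatMap
            (fun e => e.2.map (fun b => (bCanon b, e.1)))).foldl
            (fun d pr => d.modify pr.1 [] (· ++ [pr.2])) PySem.Dict.empty := by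
      unfold bIndex
      exact foldl_foldl_map_flatMap (fun e => e.2) (fun e b => (bCanon b, e.1))
        (fun d pr => d.modify pr.1 [] (· ++ [pr.2])) (PySem.List.enumerate borders 0)
        PySem.Dict.empty
    rw [hflat]
    exact PySem.Dict.nodup_keys_foldl_modify_key _ Prod.fst []
      (fun d pr => (· ++ [pr.2])) PySem.Dict.empty (by simp [PySem.Dict.keys_empty])
  have hsorted : PySem.List.sorted2 (bMatched (bIndex borders)) (fun pr => pr.1)
      (fun pr => pr.2) false = (pvCombos R).filter predM := by
    set ys := (pvCombos R).filter predM with hys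
    have hyspw : ys.Pairwise (fun u v => bLexB u v = true) :=
      (pairwise_pvCombos hRpw).filter _
    have hysnd : ys.Nodup := hyspw.imp (fun h => by
      intro heq; subst heq; simp [bLexB] at h)
    have hmnd : (bMatched (bIndex borders)).Nodup := by
      unfold bMatched
      refine foldl_set_nodup _ ?_ _ _ (by simp [PySem.Set.empty])
      intro m ps hm
      refine foldl_set_nodup _ ?_ _ _ hm
      intro m kp hm
      refine foldl_set_nodup _ ?_ _ _ hm
      intro m q hm
      split
      · exact hm
      · exact PySem.Set.nodup_add _ _ hm
    -- same membership
    have hmem : ∀ y : Int × Int, y ∈ bMatched (bIndex borders) ↔ y ∈ ys := by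
      intro y
      rw [mem_bMatched _ _ hnd]
      rw [hys, List.mem_filter]
      have hcomb : ∀ u : Int × Int,
          u ∈ pvCombos R ↔ 0 ≤ u.1 ∧ u.1 < u.2 ∧ u.2 < (data.length : Int) := by
        rintro ⟨a, b⟩
        rw [mem_pvCombos_of_pairwise hRpw a b, hmemR, hmemR]
        constructor
        · rintro ⟨⟨h1, h2⟩, ⟨h3, h4⟩, h5⟩; exact ⟨h1, h5, h4⟩
        · rintro ⟨h1, h2, h3⟩; exact ⟨⟨h1, by omega⟩, ⟨by omega, h3⟩, h2⟩
      constructor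
      · rintro ⟨c, p, hp, q, hq, hne, rfl⟩
        obtain ⟨kp, hkp, rfl, bp, hbp, hcp⟩ := (mem_getD_bIndex borders c p).1 hp
        obtain ⟨kq, hkq, rfl, bq, hbq, hcq⟩ := (mem_getD_bIndex borders c q).1 hq
        have hlen : borders.length = data.length := by simp [hborders]
        -- normalize so that the smaller position is first
        have main : ∀ (kp kq : Nat) (hkp : kp < borders.length) (hkq : kq < borders.length),
            (kp : Int) < (kq : Int) →
            (∃ bp ∈ borders[kp], bCanon bp = c) → (∃ bq ∈ borders[kq], bCanon bq = c) →
            bNorm (kp : Int) (kq : Int) ∈ pvCombos R ∧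
              predM (bNorm (kp : Int) (kq : Int)) = true := by
          intro kp kq hkp hkq hlt ⟨bp, hbp, hcp⟩ ⟨bq, hbq, hcq⟩
          have hn : bNorm (kp : Int) (kq : Int) = ((kp : Int), (kq : Int)) := by
            unfold bNorm; rw [if_pos hlt]
          rw [hn]
          constructor
          · rw [hcomb _]
            refine ⟨by positivity, by simpa using hlt, ?_⟩
            simp only
            omega
          · rw [hpredM]
            simp only
            rw [PySem.List.pyGetD_eq_getElem borders [] (by positivity) (by exact_mod_cast hkp),
              PySem.List.pyGetD_eq_getElem borders [] (by positivity) (by exact_mod_cast hkq)]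
            rw [bMatch_isSome_iff _ _ (by simp [hborders, bBorders]) (by simp [hborders, bBorders])]
            exact ⟨bp, by simpa using hbp, bq, by simpa using hbq, hcp.trans hcq.symm⟩
        have hne' : (kp : Int) ≠ (kq : Int) := hne
        rcases lt_or_gt_of_ne hne' with hlt | hgt
        · exact main kp kq hkp hkq hlt ⟨bp, hbp, hcp⟩ ⟨bq, hbq, hcq⟩
        · rw [bNorm_comm hne']
          exact main kq kp hkq hkp hgt ⟨bq, hbq, hcq⟩ ⟨bp, hbp, hcp⟩
      · rintro ⟨hcmb, hpred⟩
        rw [hcomb y] at hcmb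
        obtain ⟨h0, h1, h2⟩ := hcmb
        have hlen : borders.length = data.length := by simp [hborders]
        rw [hpredM] at hpred
        simp only at hpred
        have hl1 : y.1 < (borders.length : Int) := by omega
        have hl2 : y.2 < (borders.length : Int) := by omega
        rw [PySem.List.pyGetD_eq_getElem borders [] h0 hl1,
          PySem.List.pyGetD_eq_getElem borders [] (by omega) hl2,
          bMatch_isSome_iff _ _ (by simp [hborders, bBorders]) (by simp [hborders, bBorders])] at hpred
        obtain ⟨b1, hb1, b2, hb2, hc⟩ := hpred
        refine ⟨bCanon b1, y.1, ?_, y.2, ?_, by omega, ?_⟩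
        · exact (mem_getD_bIndex borders _ y.1).2
            ⟨y.1.toNat, by omega, by omega, b1, hb1, rfl⟩
        · exact (mem_getD_bIndex borders _ y.2).2
            ⟨y.2.toNat, by omega, by omega, b2, hb2, hc.symm⟩
        · unfold bNorm
          rw [if_pos h1]
    have hperm : ys.Perm (bMatched (bIndex borders)) :=
      (List.perm_ext_iff_of_nodup hysnd hmnd).2 (fun a => (hmem a).symm)
    exact sorted2_eq_of_perm_of_pairwise _ _ hperm hyspw
  show _ = match_tiles_alt data
  unfold match_tiles_alt
  rw [hA]
  simp only
  rw [← hborders, hsorted]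

-- ===== VERDICT (by name: the statement is the Claim_ definition above) =====
theorem match_tiles_spec : Claim_equal_match_tiles := by
  intro data _ _
  unfold Spec_match_tiles
  exact match_tiles_eq data
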